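-- pv_equiv track=rewrite | github.com/HanzoRazer/luthiers-toolbox | docs/archive/photo_vectorizer_patches/magic_number.py | _is_in_style_block
-- ===== SOURCE A (Python) =====
-- from typing import Any, Dict, List, Set
--
-- def _is_in_style_block(lines: List[str], line_idx: int) -> bool:
--     """Heuristic: scan backwards to find the nearest <style or <script tag."""
--     for i in range(line_idx - 1, max(line_idx - 200, -1), -1):
--         stripped = lines[i].strip().lower()
--         if stripped.startswith("<style"):
--             return True
--         if stripped.startswith("<script"):
--             return False
--     return False
-- ===== SOURCE B (Python) =====
-- def _is_in_style_block(lines, line_idx):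
--     """Single forward pass over the 199-line window before line_idx,
--     remembering the last style/script tag seen; the nearest preceding tag
--     is the last one in forward order."""
--     lo = max(line_idx - 199, 0)
--     hi = max(line_idx, 0)
--     result = False
--     for line in lines[lo:hi]:
--         t = line.strip().lower()
--         if t.startswith("<style"):
--             result = True
--         elif t.startswith("<script"):
--             result = False
--     return result
-- ===== Notes on version B (the rewrite author's own statement) =====
-- stated objective: alternative
-- what changed: Replaced the backward index loop with early return by a single forward pass over the pre-computed window slice lines[max(line_idx-199,0):max(line_idx,0)], tracking the last style/script tag in an accumulator (the nearest preceding tag is the last one in forward order).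
import Mathlib
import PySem

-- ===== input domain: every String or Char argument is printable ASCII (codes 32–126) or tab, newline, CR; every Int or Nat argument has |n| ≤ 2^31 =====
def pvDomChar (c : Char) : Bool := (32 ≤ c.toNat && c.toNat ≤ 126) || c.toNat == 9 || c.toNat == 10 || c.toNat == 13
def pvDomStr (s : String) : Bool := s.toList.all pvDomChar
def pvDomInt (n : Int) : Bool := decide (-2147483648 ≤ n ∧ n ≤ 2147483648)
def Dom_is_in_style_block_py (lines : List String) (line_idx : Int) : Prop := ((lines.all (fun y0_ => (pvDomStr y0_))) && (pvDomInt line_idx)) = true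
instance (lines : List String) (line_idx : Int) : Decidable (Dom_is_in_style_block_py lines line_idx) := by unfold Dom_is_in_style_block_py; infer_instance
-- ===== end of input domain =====

-- B replaces A's backward early-return index loop by one forward fold over the
-- pre-computed window slice, tracking the last style/script tag (alternative decomposition, same cost).


-- ===== PORT A =====
-- backward loop over range(line_idx-1, max(line_idx-200,-1), -1) with early return
def pvALoop (lines : List String) : List Int → Bool
  | [] => false
  | i :: rest =>
    match PySem.List.pyGet? lines i with
    | none => false   -- IndexError in Python; excluded by Pre_
    | some s =>
      let stripped := PySem.Str.lower (PySem.Str.strip s)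
      if PySem.Str.startswith stripped "<style" then true
      else if PySem.Str.startswith stripped "<script" then false
      else pvALoop lines rest

def is_in_style_block_py (lines : List String) (line_idx : Int) : Bool :=
  pvALoop lines (PySem.List.pyRange (line_idx - 1) (max (line_idx - 200) (-1)) (-1))

-- ===== PORT B =====
def pvBStep (acc : Bool) (line : String) : Bool :=
  let t := PySem.Str.lower (PySem.Str.strip line)
  if PySem.Str.startswith t "<style" then true
  else if PySem.Str.startswith t "<script" then false
  else acc

def is_in_style_block_py_alt (lines : List String) (line_idx : Int) : Bool :=
  (PySem.List.slice lines (some (max (line_idx - 199) 0)) (some (max line_idx 0))).foldl pvBStep false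

-- ===== PRECONDITION & SPEC =====
-- A raises IndexError exactly when line_idx > len(lines) (the first index scanned is past the end)
def Pre_is_in_style_block_py (lines : List String) (line_idx : Int) : Prop :=
  line_idx ≤ (lines.length : Int)
instance (lines : List String) (line_idx : Int) : Decidable (Pre_is_in_style_block_py lines line_idx) := by unfold Pre_is_in_style_block_py; infer_instance

def pvWitness_is_in_style_block_py : List String × Int := (["<style>", "x"], 2)

def Spec_is_in_style_block_py (lines : List String) (line_idx : Int) (out : Bool) : Prop := out = is_in_style_block_py_alt lines line_idx
instance (lines : List String) (line_idx : Int) (out : Bool) : Decidable (Spec_is_in_style_block_py lines line_idx out) := by unfold Spec_is_in_style_block_py; infer_instance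

-- ===== CLAIM (what is proved, stated in full; the proofs are below) =====
def Claim_equal_is_in_style_block_py : Prop := ∀ (lines : List String) (line_idx : Int), Dom_is_in_style_block_py lines line_idx → Pre_is_in_style_block_py lines line_idx → Spec_is_in_style_block_py lines line_idx (is_in_style_block_py lines line_idx)

-- ===== LEMMAS AND PROOFS =====

-- the early-return scan of A, on the list of lines it visits (in visit order)
def pvScan : List String → Bool
  | [] => false
  | s :: rest =>
    let stripped := PySem.Str.lower (PySem.Str.strip s)
    if PySem.Str.startswith stripped "<style" then true
    else if PySem.Str.startswith stripped "<script" then false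
    else pvScan rest

lemma pvALoop_eq_pvScan (lines : List String) (idxs : List Int)
    (h : ∀ i ∈ idxs, 0 ≤ i ∧ i < (lines.length : Int)) :
    pvALoop lines idxs = pvScan (idxs.map (fun i => lines.getD i.toNat "")) := by
  induction idxs with
  | nil => rfl
  | cons i rest ih =>
    obtain ⟨h0, h1⟩ := h i (List.mem_cons_self ..)
    have hget : PySem.List.pyGet? lines i = some (lines.getD i.toNat "") := by
      rw [PySem.List.pyGet?_of_nonneg lines h0]
      rw [List.getElem?_eq_getElem (by omega), List.getD_eq_getElem _ _ (by omega)]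
    simp only [pvALoop, pvScan, List.map_cons, hget]
    split_ifs <;> simp_all

-- early-return scan of the reversed list = forward last-match fold
lemma pvScan_reverse_eq_foldl (ws : List String) :
    pvScan ws.reverse = ws.foldl pvBStep false := by
  induction ws using List.reverseRecOn with
  | nil => rfl
  | append_singleton ms x ih =>
    rw [List.reverse_append, List.foldl_append]
    simp only [List.reverse_singleton, List.singleton_append, List.foldl_cons, List.foldl_nil,
      pvScan, pvBStep]
    split_ifs <;> simp_all

-- the visited lines in forward order are exactly the window slice
lemma pvWindow_eq_slice (xs : List String) (lo n : Int) (h0 : 0 ≤ lo)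
    (hn : n ≤ (xs.length : Int)) :
    (PySem.List.pyRange lo n 1).map (fun i => xs.getD i.toNat "") =
      PySem.List.slice xs (some lo) (some (max n 0)) := by
  rw [PySem.List.slice_toNat _ h0 (by omega)]
  by_cases hle : n ≤ lo
  · rw [PySem.List.pyRange_one_eq_nil hle]
    have : (max n 0).toNat - lo.toNat = 0 := by omega
    simp [this]
  · have hlt : lo < n := by omega
    apply List.ext_getElem
    · simp [PySem.List.length_pyRange_one]
      omega
    · intro k hk1 hk2
      have hkn : (k : Int) < n - lo := by
        simp [PySem.List.length_pyRange_one] at hk1; omega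
      simp only [List.getElem_map, PySem.List.getElem_pyRange_one, List.getElem_take,
        List.getElem_drop]
      have hidx : (lo + (k : Int)).toNat = lo.toNat + k := by omega
      rw [hidx, List.getD_eq_getElem _ _ (by omega)]

-- ===== VERDICT (by name: the statement is the Claim_ definition above) =====
theorem is_in_style_block_py_spec : Claim_equal_is_in_style_block_py := by
  intro lines n _hdom hpre
  unfold Spec_is_in_style_block_py is_in_style_block_py is_in_style_block_py_alt
  unfold Pre_is_in_style_block_py at hpre
  have hupper : n - 1 + 1 = n := by omega
  have hlo : max (n - 200) (-1) + 1 = max (n - 199) 0 := by omega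
  rw [PySem.List.pyRange_neg_one_eq_reverse, hupper, hlo]
  rw [pvALoop_eq_pvScan]
  · rw [List.map_reverse, pvScan_reverse_eq_foldl,
      pvWindow_eq_slice lines (max (n - 199) 0) n (by omega) hpre]
  · intro i hi
    rw [List.mem_reverse, PySem.List.mem_pyRange_one] at hi
    omega
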